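-- pv_equiv track=rewrite | github.com/fsarda/chiara | pes_maxim.py | pes_maxim
-- ===== SOURCE A (Python) =====
-- def pes_maxim(V,M):
--
--   # Obtener tamanio de la lista
--   size = len(V)
--
--   # Verificamos las condiciones base
--   # 1) la lista tiene al menos un elemento
--   if(size < 1):
--     return 0
--
--   # Verificamos que M esta en el rango correcto
--   if( 1 < M > size ):
--     return 0
--
--   # Calculamos el resultado
--   result = 0 #Valor para acumular la suma
--   V.sort(reverse=True) # ordenamos la lista de mayor a menor
--
--   # Sumamos los elementos desde 1 hasta la posicion M
--   for i in range(M):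
--     result += V[i]
--
--   # retornamos el resultado calculado
--   return result
-- ===== SOURCE B (Python) =====
-- def topsum(l, k):
--     # sum of the k largest elements of l (quickselect-style recursion)
--     if k <= 0:
--         return 0
--     if k >= len(l):
--         return sum(l)
--     p = l[0]
--     hi = [x for x in l if x > p]
--     nh = len(hi)
--     if k <= nh:
--         return topsum(hi, k)
--     eq = [x for x in l if x == p]
--     ne = len(eq)
--     if k <= nh + ne:
--         return sum(hi) + (k - nh) * p
--     lo = [x for x in l if x < p]
--     return sum(hi) + sum(eq) + topsum(lo, k - nh - ne)
--
-- def pes_maxim(V, M):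
--     if len(V) < 1:
--         return 0
--     if M > 1 and M > len(V):
--         return 0
--     return topsum(V, M)
-- ===== Notes on version B (the rewrite author's own statement) =====
-- stated objective: faster
-- what changed: replaces sort-then-sum-prefix with a recursive three-way quickselect partition (pivot = first element) that sums the M largest without sorting
import Mathlib
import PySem

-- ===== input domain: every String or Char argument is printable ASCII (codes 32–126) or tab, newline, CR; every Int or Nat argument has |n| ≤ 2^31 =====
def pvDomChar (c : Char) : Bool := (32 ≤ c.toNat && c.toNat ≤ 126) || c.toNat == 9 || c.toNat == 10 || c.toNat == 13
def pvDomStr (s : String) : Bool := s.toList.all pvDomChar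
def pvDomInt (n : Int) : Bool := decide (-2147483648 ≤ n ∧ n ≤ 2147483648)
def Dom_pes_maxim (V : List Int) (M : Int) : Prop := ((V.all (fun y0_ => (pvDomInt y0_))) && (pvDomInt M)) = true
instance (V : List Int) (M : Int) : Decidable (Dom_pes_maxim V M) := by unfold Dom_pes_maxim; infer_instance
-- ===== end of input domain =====

-- B replaces sort-then-sum-prefix with a quickselect-style partition; equivalence is about the
-- RETURN value only: the Python A sorts V in place, B does not mutate V.

-- ===== PORT A =====
def pes_maxim (V : List Int) (M : Int) : Int :=
  let size : Int := V.length
  if size < 1 then 0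
  else if 1 < M ∧ M > size then 0
  else
    let Vs := PySem.List.sorted V (fun x => x) true
    -- every index reached is in range (0 ≤ i < M ≤ size), so pyGetD's default is never used
    (PySem.List.pyRange 0 M 1).foldl (fun result i => result + PySem.List.pyGetD Vs i 0) 0

-- ===== PORT B =====

-- used by topsum's termination proof (cited in decreasing_by)
theorem pv_len_filter_cons_lt (p : Int) (t : List Int) (q : Int → Bool) (hq : q p = false) :
    ((p :: t).filter q).length < (p :: t).length := by
  simp only [List.filter_cons, hq, if_neg, List.length_cons, Bool.false_eq_true, not_false_iff]
  exact Nat.lt_succ_of_le (List.length_filter_le q t)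

def topsum (l : List Int) (k : Int) : Int :=
  if k ≤ 0 then 0
  else if (l.length : Int) ≤ k then l.sum
  else
    match l with
    | [] => 0
    | p :: t =>
      let hi := (p :: t).filter (fun x => p < x)
      let nh : Int := hi.length
      if k ≤ nh then topsum hi k
      else
        let eqs := (p :: t).filter (fun x => x = p)
        let ne : Int := eqs.length
        if k ≤ nh + ne then hi.sum + (k - nh) * p
        else
          let lo := (p :: t).filter (fun x => x < p)
          hi.sum + eqs.sum + topsum lo (k - nh - ne)
  termination_by l.length
  decreasing_by
  · exact pv_len_filter_cons_lt p _ (fun x => decide (p < x)) (decide_eq_false (lt_irrefl p))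
  · exact pv_len_filter_cons_lt p _ (fun x => decide (x < p)) (decide_eq_false (lt_irrefl p))

def pes_maxim_alt (V : List Int) (M : Int) : Int :=
  if V.length < 1 then 0
  else if M > 1 ∧ M > (V.length : Int) then 0
  else topsum V M

-- ===== PRECONDITION & SPEC =====
def Spec_pes_maxim (V : List Int) (M : Int) (out : Int) : Prop := out = pes_maxim_alt V M
instance (V : List Int) (M : Int) (out : Int) : Decidable (Spec_pes_maxim V M out) := by unfold Spec_pes_maxim; infer_instance

-- ===== CLAIM (what is proved, stated in full; the proofs are below) =====
def Claim_equal_pes_maxim : Prop := ∀ (V : List Int) (M : Int), Dom_pes_maxim V M → Spec_pes_maxim V M (pes_maxim V M)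


-- ===== LEMMAS AND PROOFS =====

-- sum of a constant list
theorem pv_sum_const (p : Int) (m : List Int) (h : ∀ x ∈ m, x = p) :
    m.sum = (m.length : Int) * p := by
  induction m with
  | nil => simp
  | cons a t ih =>
    have ha : a = p := h a (by simp)
    have := ih (fun x hx => h x (by simp [hx]))
    simp [ha, this]; ring

-- pointwise facts about the three partition predicates
theorem pv_filter_eq_of_not_gt (p : Int) (l : List Int) :
    (l.filter (fun x => !decide (p < x))).filter (fun x => decide (x = p))
      = l.filter (fun x => decide (x = p)) := by
  rw [List.filter_filter]
  apply List.filter_congr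
  intro x _
  by_cases h : x = p
  · subst h; simp
  · simp [h]

theorem pv_filter_lt_of_not_gt (p : Int) (l : List Int) :
    (l.filter (fun x => !decide (p < x))).filter (fun x => !decide (x = p))
      = l.filter (fun x => decide (x < p)) := by
  rw [List.filter_filter]
  apply List.filter_congr
  intro x _
  by_cases h1 : x = p
  · subst h1; simp
  · by_cases h2 : p < x
    · simp [h1, h2, not_lt_of_gt h2]
    · have h3 : x < p := lt_of_le_of_ne (not_lt.mp h2) h1
      simp [h1, h2, h3]

-- sorting in reverse order splits along a three-way partition at any pivot
theorem pv_sorted_partition (p : Int) (l : List Int) :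
    PySem.List.sorted l (fun x => x) true =
      PySem.List.sorted (l.filter (fun x => p < x)) (fun x => x) true
        ++ (l.filter (fun x => x = p)
        ++ PySem.List.sorted (l.filter (fun x => x < p)) (fun x => x) true) := by
  apply List.Perm.eq_of_pairwise (le := fun a b : Int => b ≤ a)
    (fun a b _ _ h1 h2 => le_antisymm h2 h1)
  · exact PySem.List.sorted_pairwise_rev l (fun x => x)
  · -- the concatenation is reverse-sorted
    apply List.pairwise_append.mpr
    refine ⟨PySem.List.sorted_pairwise_rev _ _, ?_, ?_⟩
    · apply List.pairwise_append.mpr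
      refine ⟨?_, PySem.List.sorted_pairwise_rev _ _, ?_⟩
      · apply List.pairwise_of_forall_mem_list
        intro a ha b hb
        have ha' : a = p := by simpa using (List.mem_filter.mp ha).2
        have hb' : b = p := by simpa using (List.mem_filter.mp hb).2
        simp [ha', hb']
      · intro a ha b hb
        have ha' : a = p := by simpa using (List.mem_filter.mp ha).2
        have hb' : b < p := by
          have := (List.mem_filter.mp ((PySem.List.mem_sorted _ _ _ b).mp hb)).2
          simpa using this
        simp [ha']; exact le_of_lt hb'
    · intro a ha b hb
      have ha' : p < a := by
        have := (List.mem_filter.mp ((PySem.List.mem_sorted _ _ _ a).mp ha)).2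
        simpa using this
      have hb' : b ≤ p := by
        rcases List.mem_append.mp hb with h | h
        · have : b = p := by simpa using (List.mem_filter.mp h).2
          simp [this]
        · have : b < p := by
            have := (List.mem_filter.mp ((PySem.List.mem_sorted _ _ _ b).mp h)).2
            simpa using this
          exact le_of_lt this
      exact le_trans hb' (le_of_lt ha')
  · -- the two sides are permutations of each other
    refine List.Perm.trans (PySem.List.sorted_perm l _ true) (List.Perm.symm ?_)
    have step1 : (l.filter (fun x => decide (p < x))
        ++ l.filter (fun x => !decide (p < x))).Perm l :=
      List.filter_append_perm _ l
    have step2 : (l.filter (fun x => decide (x = p))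
        ++ l.filter (fun x => decide (x < p))).Perm
          (l.filter (fun x => !decide (p < x))) := by
      have := List.filter_append_perm (fun x => decide (x = p))
        (l.filter (fun x => !decide (p < x)))
      rwa [pv_filter_eq_of_not_gt, pv_filter_lt_of_not_gt] at this
    exact ((List.Perm.append (PySem.List.sorted_perm _ _ _)
        (List.Perm.append (List.Perm.refl _) (PySem.List.sorted_perm _ _ _))).trans
      ((List.Perm.append (List.Perm.refl _) step2).trans step1))

-- topsum computes the sum of the first k elements of the reverse-sorted list
theorem pv_topsum_eq (n : Nat) : ∀ (l : List Int), l.length ≤ n → ∀ k : Int,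
    topsum l k = ((PySem.List.sorted l (fun x => x) true).take k.toNat).sum := by
  induction n with
  | zero =>
    intro l hl k
    have : l = [] := List.eq_nil_of_length_eq_zero (Nat.le_zero.mp hl)
    subst this
    rw [topsum.eq_def]
    simp [PySem.List.sorted]
  | succ n ih =>
    intro l hl k
    rw [topsum.eq_def]
    split_ifs with h1 h2
    · simp [Int.toNat_of_nonpos h1]
    · rw [List.take_of_length_le (by rw [PySem.List.length_sorted]; omega)]
      exact ((PySem.List.sorted_perm l _ true).sum_eq).symm
    · cases l with
      | nil => simp at h2; omega
      | cons p t =>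
        simp only []
        have hhi : ((p :: t).filter (fun x => p < x)).length < (p :: t).length :=
          pv_len_filter_cons_lt p t _ (decide_eq_false (lt_irrefl p))
        have hlo : ((p :: t).filter (fun x => x < p)).length < (p :: t).length :=
          pv_len_filter_cons_lt p t _ (decide_eq_false (lt_irrefl p))
        have hgh : (PySem.List.sorted ((p :: t).filter (fun x => p < x)) (fun x => x) true).length
            = ((p :: t).filter (fun x => p < x)).length := PySem.List.length_sorted _ _ _
        have hgl : (PySem.List.sorted ((p :: t).filter (fun x => x < p)) (fun x => x) true).length
            = ((p :: t).filter (fun x => x < p)).length := PySem.List.length_sorted _ _ _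
        rw [pv_sorted_partition p (p :: t)]
        split_ifs with h3 h4
        · -- k ≤ |hi| : recurse into hi
          rw [List.take_append_of_le_length
            (by rw [PySem.List.length_sorted]; omega)]
          exact ih _ (by omega) k
        · -- |hi| < k ≤ |hi| + |eq|
          rw [List.take_append, List.take_of_length_le (by rw [PySem.List.length_sorted]; omega),
            List.take_append_of_le_length (by rw [PySem.List.length_sorted]; omega),
            List.sum_append]
          have hsum : (PySem.List.sorted ((p :: t).filter (fun x => p < x)) (fun x => x) true).sum
              = ((p :: t).filter (fun x => p < x)).sum :=
            (PySem.List.sorted_perm _ _ _).sum_eq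
          have htake : (((p :: t).filter (fun x => x = p)).take
              (k.toNat - (PySem.List.sorted ((p :: t).filter (fun x => p < x)) (fun x => x) true).length)).sum
              = (k - (((p :: t).filter (fun x => p < x)).length : Int)) * p := by
            rw [pv_sum_const p _ (fun x hx => by
              simpa using (List.mem_filter.mp (List.mem_of_mem_take hx)).2)]
            congr 1
            rw [List.length_take, PySem.List.length_sorted]
            have hle : k.toNat - ((p :: t).filter (fun x => p < x)).length
                ≤ (((p :: t)).filter (fun x => x = p)).length := by omega
            rw [min_eq_left hle]
            omega
          rw [hsum, htake]
        · -- k > |hi| + |eq| : recurse into lo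
          rw [List.take_append, List.take_of_length_le (by rw [PySem.List.length_sorted]; omega),
            List.take_append, List.take_of_length_le (by omega),
            List.sum_append, List.sum_append]
          have hsum : (PySem.List.sorted ((p :: t).filter (fun x => p < x)) (fun x => x) true).sum
              = ((p :: t).filter (fun x => p < x)).sum :=
            (PySem.List.sorted_perm _ _ _).sum_eq
          have hrec := ih ((p :: t).filter (fun x => x < p)) (by omega)
            (k - (((p :: t).filter (fun x => p < x)).length : Int)
               - (((p :: t).filter (fun x => x = p)).length : Int))
          rw [hrec, hsum]
          have hcast : (k - (((p :: t).filter (fun x => p < x)).length : Int)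
              - (((p :: t).filter (fun x => x = p)).length : Int)).toNat
              = k.toNat - (PySem.List.sorted ((p :: t).filter (fun x => p < x)) (fun x => x) true).length
                - ((p :: t).filter (fun x => x = p)).length := by
            rw [PySem.List.length_sorted]; omega
          rw [hcast]
          ring

-- A's summation loop is the sum of the first n elements
theorem pv_foldl_sum (xs : List Int) (n : Nat) (h : n ≤ xs.length) : ∀ init : Int,
    (PySem.List.pyRange 0 (n : Int) 1).foldl (fun r i => r + PySem.List.pyGetD xs i 0) init
      = init + (xs.take n).sum := by
  induction n with
  | zero => intro init; simp
  | succ m ih =>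
    intro init
    have hcast : ((m + 1 : Nat) : Int) = (m : Int) + 1 := by push_cast; ring
    rw [hcast, PySem.List.pyRange_one_succ_right (by positivity), List.foldl_append,
      ih (by omega) init]
    have hm : m < xs.length := by omega
    simp only [List.foldl_cons, List.foldl_nil, PySem.List.pyGetD_natCast]
    rw [List.take_add_one, List.sum_append, List.getElem?_eq_getElem hm]
    simp [List.getD, List.getElem?_eq_getElem hm]
    ring

-- ===== VERDICT (by name: the statement is the Claim_ definition above) =====
theorem pes_maxim_spec : Claim_equal_pes_maxim := by
  intro V M _
  unfold Spec_pes_maxim pes_maxim pes_maxim_alt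
  simp only []
  split_ifs with h1 h2 h1' h2' h1' <;> try rfl
  all_goals try (exfalso; omega)
  · -- main branch on both sides
    rw [pv_topsum_eq V.length V le_rfl M]
    by_cases hM : M ≤ 0
    · rw [PySem.List.pyRange_one_eq_nil (by omega)]
      simp [Int.toNat_of_nonpos hM]
    · have hMle : M ≤ (V.length : Int) := by omega
      obtain ⟨nn, rfl⟩ : ∃ nn : Nat, M = (nn : Int) := ⟨M.toNat, by omega⟩
      have hlen : nn ≤ (PySem.List.sorted V (fun x => x) true).length := by
        rw [PySem.List.length_sorted]; omega
      rw [pv_foldl_sum _ nn hlen 0, Int.toNat_natCast]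
      exact zero_add _
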